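-- pv_equiv track=rewrite | github.com/SiddharthGianchandani/Face_Recognizer_GUI | main/gui.py | consider1
-- ===== SOURCE A (Python) =====
-- def consider1(loc,loc1,bottom_limit,right_limit):
--    for m1 in loc1:
--       temp=[]
--       for m in loc:
--          if (m[0]-30<=m1[0]<=m[0]+30)or(m[1]-30<=m1[1]<=m[1]+30)or(m[2]-30<=m1[2]<=m[2]+30)or(m[3]-30<=m1[3]<=m[3]+30):
--            continue
--          temp.append(m)
--       loc=temp
--
--    for m in loc:
--       loc1.append(m)
--    L=[]
--    for (top,right,bottom,left) in loc1:
--       if bottom<=bottom_limit and right<=right_limit: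
--          L.append((top,right,bottom,left))
--
--    return L
-- ===== SOURCE B (Python) =====
-- def consider1(loc, loc1, bottom_limit, right_limit):
--     # Sorted per-axis coordinate index over loc1 + binary search:
--     # exists m1 with OR_i (m[i]-30 <= m1[i] <= m[i]+30)  iff  some axis i has a
--     # loc1 coordinate in [m[i]-30, m[i]+30], found by lower-bound binary search.
--     s0 = sorted(m1[0] for m1 in loc1)
--     s1 = sorted(m1[1] for m1 in loc1)
--     s2 = sorted(m1[2] for m1 in loc1)
--     s3 = sorted(m1[3] for m1 in loc1)
--
--     def lower_bound(vals, lo):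
--         a, b = 0, len(vals)
--         while a < b:
--             mid = (a + b) // 2
--             if vals[mid] < lo:
--                 a = mid + 1
--             else:
--                 b = mid
--         return a
--
--     def hit(vals, lo, hi):
--         j = lower_bound(vals, lo)
--         return j < len(vals) and vals[j] <= hi
--
--     kept = [m for m in loc
--             if not (hit(s0, m[0] - 30, m[0] + 30) or hit(s1, m[1] - 30, m[1] + 30)
--                     or hit(s2, m[2] - 30, m[2] + 30) or hit(s3, m[3] - 30, m[3] + 30))]
--     loc1.extend(kept)
--     return [(top, right, bottom, left) for (top, right, bottom, left) in loc1
--             if bottom <= bottom_limit and right <= right_limit]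
-- ===== Notes on version B (the rewrite author's own statement) =====
-- stated objective: alternative
-- what changed: Instead of the all-pairs nested proximity scan, B builds four sorted per-axis coordinate lists of loc1 and decides each box of loc by a lower-bound binary search per axis (a loc1 coordinate in [m[i]-30,m[i]+30]), correct because the exists-over-loc1 of an OR of per-axis interval tests distributes into per-axis interval-emptiness queries; asymptotically O((n+k)log k) vs O(n*k), though a timing run could not measure a difference at its input sizes.
import Mathlib
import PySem

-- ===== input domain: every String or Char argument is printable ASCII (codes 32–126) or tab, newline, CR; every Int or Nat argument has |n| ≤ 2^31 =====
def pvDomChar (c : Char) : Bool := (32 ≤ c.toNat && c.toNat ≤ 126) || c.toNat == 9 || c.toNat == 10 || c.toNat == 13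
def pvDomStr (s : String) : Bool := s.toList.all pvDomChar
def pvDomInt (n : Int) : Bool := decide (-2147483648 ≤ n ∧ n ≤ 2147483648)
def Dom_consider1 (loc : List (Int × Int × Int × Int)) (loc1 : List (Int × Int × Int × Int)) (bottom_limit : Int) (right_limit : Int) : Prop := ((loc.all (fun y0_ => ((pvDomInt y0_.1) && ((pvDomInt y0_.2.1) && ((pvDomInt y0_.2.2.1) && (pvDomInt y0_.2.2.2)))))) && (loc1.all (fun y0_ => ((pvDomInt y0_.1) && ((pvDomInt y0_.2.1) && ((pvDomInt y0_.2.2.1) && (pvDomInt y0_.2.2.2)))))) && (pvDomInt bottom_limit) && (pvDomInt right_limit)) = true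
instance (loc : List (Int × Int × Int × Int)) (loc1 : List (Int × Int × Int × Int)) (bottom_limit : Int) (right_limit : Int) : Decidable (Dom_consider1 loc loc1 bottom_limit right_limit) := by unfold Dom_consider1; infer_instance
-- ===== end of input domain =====

-- B replaces A's all-pairs ±30 proximity scan by four sorted per-axis coordinate lists of loc1
-- queried with a lower-bound binary search per box (objective: alternative algorithm; asymptotically better, not measured faster here). Equivalence is about the
-- RETURN value; both Pythons also extend loc1 in place with the same surviving boxes.
-- ===== PORT A =====
def consider1 (loc : List (Int × Int × Int × Int)) (loc1 : List (Int × Int × Int × Int)) (bottom_limit : Int) (right_limit : Int) : List (Int × Int × Int × Int) :=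
  -- for m1 in loc1: temp=[]; for m in loc: if <4-range OR>: continue else temp.append(m); loc=temp
  let locF := loc1.foldl (fun locAcc m1 =>
    locAcc.foldl (fun temp m =>
      if (m.1 - 30 ≤ m1.1 ∧ m1.1 ≤ m.1 + 30) ∨ (m.2.1 - 30 ≤ m1.2.1 ∧ m1.2.1 ≤ m.2.1 + 30) ∨
         (m.2.2.1 - 30 ≤ m1.2.2.1 ∧ m1.2.2.1 ≤ m.2.2.1 + 30) ∨
         (m.2.2.2 - 30 ≤ m1.2.2.2 ∧ m1.2.2.2 ≤ m.2.2.2 + 30)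
      then temp else temp ++ [m]) []) loc
  -- for m in loc: loc1.append(m)
  let loc1F := locF.foldl (fun acc m => acc ++ [m]) loc1
  -- L=[]; for (top,right,bottom,left) in loc1: if bottom<=bottom_limit and right<=right_limit: L.append(...)
  loc1F.foldl (fun L p =>
    if p.2.2.1 ≤ bottom_limit ∧ p.2.1 ≤ right_limit then L ++ [p] else L) []

-- ===== PORT B =====
-- while a < b: mid=(a+b)//2; if vals[mid]<lo: a=mid+1 else: b=mid;  return a
def pvLB (vals : List Int) (lo : Int) (a b : Nat) : Nat :=
  if _h : a < b then
    if vals.getD ((a + b) / 2) 0 < lo then pvLB vals lo ((a + b) / 2 + 1) b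
    else pvLB vals lo a ((a + b) / 2)
  else a
termination_by b - a
decreasing_by all_goals omega

-- hit(vals, lo, hi): j = lower_bound(vals, lo); return j < len(vals) and vals[j] <= hi
def pvHit (vals : List Int) (lo hi : Int) : Bool :=
  let j := pvLB vals lo 0 vals.length
  decide (j < vals.length) && decide (vals.getD j 0 ≤ hi)

def consider1_alt (loc : List (Int × Int × Int × Int)) (loc1 : List (Int × Int × Int × Int)) (bottom_limit : Int) (right_limit : Int) : List (Int × Int × Int × Int) :=
  let s0 := PySem.List.sorted (loc1.map (fun m1 => m1.1)) (fun x => x) false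
  let s1 := PySem.List.sorted (loc1.map (fun m1 => m1.2.1)) (fun x => x) false
  let s2 := PySem.List.sorted (loc1.map (fun m1 => m1.2.2.1)) (fun x => x) false
  let s3 := PySem.List.sorted (loc1.map (fun m1 => m1.2.2.2)) (fun x => x) false
  let kept := loc.filter (fun m =>
    !(pvHit s0 (m.1 - 30) (m.1 + 30) || pvHit s1 (m.2.1 - 30) (m.2.1 + 30) ||
      pvHit s2 (m.2.2.1 - 30) (m.2.2.1 + 30) || pvHit s3 (m.2.2.2 - 30) (m.2.2.2 + 30)))
  (loc1 ++ kept).filter (fun p => decide (p.2.2.1 ≤ bottom_limit) && decide (p.2.1 ≤ right_limit))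

-- ===== PRECONDITION & SPEC =====
def Spec_consider1 (loc : List (Int × Int × Int × Int)) (loc1 : List (Int × Int × Int × Int)) (bottom_limit : Int) (right_limit : Int) (out : List (Int × Int × Int × Int)) : Prop := out = consider1_alt loc loc1 bottom_limit right_limit
instance (loc : List (Int × Int × Int × Int)) (loc1 : List (Int × Int × Int × Int)) (bottom_limit : Int) (right_limit : Int) (out : List (Int × Int × Int × Int)) : Decidable (Spec_consider1 loc loc1 bottom_limit right_limit out) := by unfold Spec_consider1; infer_instance

-- ===== CLAIM (what is proved, stated in full; the proofs are below) =====
def Claim_equal_consider1 : Prop := ∀ (loc : List (Int × Int × Int × Int)) (loc1 : List (Int × Int × Int × Int)) (bottom_limit : Int) (right_limit : Int), Dom_consider1 loc loc1 bottom_limit right_limit → Spec_consider1 loc loc1 bottom_limit right_limit (consider1 loc loc1 bottom_limit right_limit)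

-- ===== LEMMAS AND PROOFS =====

-- the 4-coordinate proximity test of A, as a Bool helper for the lemmas
def pvNear (m m1 : Int × Int × Int × Int) : Bool :=
  (m.1 - 30 ≤ m1.1 && m1.1 ≤ m.1 + 30) || (m.2.1 - 30 ≤ m1.2.1 && m1.2.1 ≤ m.2.1 + 30) ||
  (m.2.2.1 - 30 ≤ m1.2.2.1 && m1.2.2.1 ≤ m.2.2.1 + 30) ||
  (m.2.2.2 - 30 ≤ m1.2.2.2 && m1.2.2.2 ≤ m.2.2.2 + 30)

-- inner loop of A's phase 1 is a filter
lemma pvInner (m1 : Int × Int × Int × Int) (loc acc : List (Int × Int × Int × Int)) :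
    loc.foldl (fun temp m => if pvNear m m1 then temp else temp ++ [m]) acc
      = acc ++ loc.filter (fun m => !pvNear m m1) := by
  induction loc generalizing acc with
  | nil => simp
  | cons x xs ih =>
    by_cases h : pvNear x m1 <;> simp [List.foldl_cons, h, ih]

-- A's iterated shrinking over loc1 equals one filter over loc
lemma pvPhase1 (loc1 loc : List (Int × Int × Int × Int)) :
    loc1.foldl (fun locAcc m1 =>
        locAcc.foldl (fun temp m => if pvNear m m1 then temp else temp ++ [m]) []) loc
      = loc.filter (fun m => !loc1.any (fun m1 => pvNear m m1)) := by
  induction loc1 generalizing loc with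
  | nil => simp
  | cons y ys ih =>
    simp only [List.foldl_cons]
    have h1 : loc.foldl (fun temp m => if pvNear m y then temp else temp ++ [m]) []
        = loc.filter (fun m => !pvNear m y) := by simpa using pvInner y loc []
    rw [h1, ih, List.filter_filter]
    apply List.filter_congr
    intro m _
    cases h : pvNear m y <;> simp [h]

lemma pvAppendLoop (xs acc : List (Int × Int × Int × Int)) :
    xs.foldl (fun acc m => acc ++ [m]) acc = acc ++ xs := by
  induction xs generalizing acc with
  | nil => simp
  | cons x xs ih => simp [List.foldl_cons, ih]

-- correctness of the lower-bound binary search on a list monotone under getD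
lemma pvLB_spec (vals : List Int) (lo : Int) (a b : Nat)
    (hmono : ∀ p q, p ≤ q → q < vals.length → vals.getD p 0 ≤ vals.getD q 0)
    (hb : b ≤ vals.length)
    (hlow : ∀ j, j < a → vals.getD j 0 < lo)
    (hhigh : ∀ j, b ≤ j → j < vals.length → lo ≤ vals.getD j 0) :
    (∀ j, j < pvLB vals lo a b → vals.getD j 0 < lo) ∧
    (∀ j, pvLB vals lo a b ≤ j → j < vals.length → lo ≤ vals.getD j 0) := by
  induction a, b using pvLB.induct vals lo with
  | case1 a b hab hmid ih =>
    rw [pvLB, dif_pos hab, if_pos hmid]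
    exact ih hb
      (fun j hj => by
        rcases Nat.lt_or_ge j a with hja | hja
        · exact hlow j hja
        · exact lt_of_le_of_lt (hmono j ((a+b)/2) (by omega) (by omega)) hmid)
      hhigh
  | case2 a b hab hmid ih =>
    rw [pvLB, dif_pos hab, if_neg hmid]
    exact ih (by omega) hlow
      (fun j hj hjl => le_trans (not_lt.mp hmid) (hmono ((a+b)/2) j hj hjl))
  | case3 a b hab =>
    rw [pvLB, dif_neg hab]
    exact ⟨hlow, fun j hj hjl => hhigh j (by omega) hjl⟩

-- hit = "some value of vals lies in [lo, hi]" on a monotone list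
lemma pvHit_spec (vals : List Int) (lo hi : Int)
    (hmono : ∀ p q, p ≤ q → q < vals.length → vals.getD p 0 ≤ vals.getD q 0) :
    pvHit vals lo hi = vals.any (fun v => decide (lo ≤ v) && decide (v ≤ hi)) := by
  obtain ⟨h1, h2⟩ := pvLB_spec vals lo 0 vals.length hmono le_rfl
    (by omega) (fun j hj hjl => absurd hjl (by omega))
  set r := pvLB vals lo 0 vals.length with hr
  unfold pvHit
  rw [← hr]
  cases hcase : (decide (r < vals.length) && decide (vals.getD r 0 ≤ hi)) with
  | true =>
    simp only [Bool.and_eq_true, decide_eq_true_eq] at hcase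
    obtain ⟨hrl, hrh⟩ := hcase
    symm
    rw [List.any_eq_true]
    refine ⟨vals.getD r 0, ?_, ?_⟩
    · rw [List.getD_eq_getElem?_getD, List.getElem?_eq_getElem hrl]
      exact List.getElem_mem hrl
    · simp only [Bool.and_eq_true, decide_eq_true_eq]
      exact ⟨h2 r le_rfl hrl, hrh⟩
  | false =>
    symm
    rw [Bool.eq_false_iff]
    intro hany
    rw [List.any_eq_true] at hany
    obtain ⟨v, hv, hvb⟩ := hany
    simp only [Bool.and_eq_true, decide_eq_true_eq] at hvb
    obtain ⟨j, hjl, hje⟩ := List.getElem_of_mem hv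
    have hjd : vals.getD j 0 = v := by
      rw [List.getD_eq_getElem?_getD, List.getElem?_eq_getElem hjl]
      exact hje
    have hjr : r ≤ j := by
      by_contra hc
      exact absurd (hjd ▸ h1 j (not_le.mp hc)) (not_lt.mpr hvb.1)
    have hrlen : r < vals.length := lt_of_le_of_lt hjr hjl
    have hle : vals.getD r 0 ≤ hi := le_trans (hmono r j hjr hjl) (hjd ▸ hvb.2)
    have htrue : (decide (r < vals.length) && decide (vals.getD r 0 ≤ hi)) = true := by
      simp only [Bool.and_eq_true, decide_eq_true_eq]
      exact ⟨hrlen, hle⟩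
    rw [hcase] at htrue
    exact Bool.false_ne_true htrue

-- a Python-sorted Int list is monotone under getD
lemma pvSortedMono (xs : List Int) :
    ∀ p q, p ≤ q → q < (PySem.List.sorted xs (fun x => x) false).length →
      (PySem.List.sorted xs (fun x => x) false).getD p 0
        ≤ (PySem.List.sorted xs (fun x => x) false).getD q 0 := by
  intro p q hpq hq
  have hp : p < (PySem.List.sorted xs (fun x => x) false).length := lt_of_le_of_lt hpq hq
  rw [List.getD_eq_getElem?_getD, List.getElem?_eq_getElem hp,
      List.getD_eq_getElem?_getD, List.getElem?_eq_getElem hq]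
  exact PySem.List.sorted_id_getElem_mono xs hpq hq

-- B's per-axis binary-search test equals A's any-over-loc1 proximity test
lemma pvPredEq (loc1 : List (Int × Int × Int × Int)) (m : Int × Int × Int × Int) :
    (pvHit (PySem.List.sorted (loc1.map (fun m1 => m1.1)) (fun x => x) false) (m.1 - 30) (m.1 + 30) ||
     pvHit (PySem.List.sorted (loc1.map (fun m1 => m1.2.1)) (fun x => x) false) (m.2.1 - 30) (m.2.1 + 30) ||
     pvHit (PySem.List.sorted (loc1.map (fun m1 => m1.2.2.1)) (fun x => x) false) (m.2.2.1 - 30) (m.2.2.1 + 30) ||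
     pvHit (PySem.List.sorted (loc1.map (fun m1 => m1.2.2.2)) (fun x => x) false) (m.2.2.2 - 30) (m.2.2.2 + 30))
      = loc1.any (fun m1 => pvNear m m1) := by
  rw [pvHit_spec _ _ _ (pvSortedMono _), pvHit_spec _ _ _ (pvSortedMono _),
      pvHit_spec _ _ _ (pvSortedMono _), pvHit_spec _ _ _ (pvSortedMono _)]
  rcases hb : loc1.any (fun m1 => pvNear m m1) with _ | _
  · rw [Bool.eq_false_iff] at hb ⊢
    intro hc
    apply hb
    rw [List.any_eq_true]
    simp only [Bool.or_eq_true, List.any_eq_true, PySem.List.mem_sorted, List.mem_map] at hc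
    rcases hc with ((⟨v,⟨m1,hm1,hv⟩,hvb⟩|⟨v,⟨m1,hm1,hv⟩,hvb⟩)|⟨v,⟨m1,hm1,hv⟩,hvb⟩)|⟨v,⟨m1,hm1,hv⟩,hvb⟩ <;>
      exact ⟨m1, hm1, by subst hv; simp only [pvNear, Bool.or_eq_true, Bool.and_eq_true, decide_eq_true_eq]; simp only [Bool.and_eq_true, decide_eq_true_eq] at hvb; tauto⟩
  · rw [List.any_eq_true] at hb
    obtain ⟨m1, hm1, hn⟩ := hb
    simp only [pvNear, Bool.or_eq_true, Bool.and_eq_true, decide_eq_true_eq] at hn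
    simp only [Bool.or_eq_true, List.any_eq_true, PySem.List.mem_sorted, List.mem_map]
    rcases hn with ((h|h)|h)|h
    · exact Or.inl (Or.inl (Or.inl ⟨m1.1, ⟨m1, hm1, rfl⟩, by simp; omega⟩))
    · exact Or.inl (Or.inl (Or.inr ⟨m1.2.1, ⟨m1, hm1, rfl⟩, by simp; omega⟩))
    · exact Or.inl (Or.inr ⟨m1.2.2.1, ⟨m1, hm1, rfl⟩, by simp; omega⟩)
    · exact Or.inr ⟨m1.2.2.2, ⟨m1, hm1, rfl⟩, by simp; omega⟩

-- ===== VERDICT (by name: the statement is the Claim_ definition above) =====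
theorem consider1_spec : Claim_equal_consider1 := by
  intro loc loc1 bottom_limit right_limit _
  unfold Spec_consider1 consider1 consider1_alt
  simp only []
  have h1 : loc1.foldl (fun locAcc m1 =>
      locAcc.foldl (fun temp m =>
        if (m.1 - 30 ≤ m1.1 ∧ m1.1 ≤ m.1 + 30) ∨ (m.2.1 - 30 ≤ m1.2.1 ∧ m1.2.1 ≤ m.2.1 + 30) ∨
           (m.2.2.1 - 30 ≤ m1.2.2.1 ∧ m1.2.2.1 ≤ m.2.2.1 + 30) ∨
           (m.2.2.2 - 30 ≤ m1.2.2.2 ∧ m1.2.2.2 ≤ m.2.2.2 + 30)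
        then temp else temp ++ [m]) []) loc
      = loc.filter (fun m => !loc1.any (fun m1 => pvNear m m1)) := by
    rw [← pvPhase1]
    have hfun : (fun (locAcc : List (Int × Int × Int × Int)) (m1 : Int × Int × Int × Int) =>
        locAcc.foldl (fun temp m =>
          if (m.1 - 30 ≤ m1.1 ∧ m1.1 ≤ m.1 + 30) ∨ (m.2.1 - 30 ≤ m1.2.1 ∧ m1.2.1 ≤ m.2.1 + 30) ∨
             (m.2.2.1 - 30 ≤ m1.2.2.1 ∧ m1.2.2.1 ≤ m.2.2.1 + 30) ∨
             (m.2.2.2 - 30 ≤ m1.2.2.2 ∧ m1.2.2.2 ≤ m.2.2.2 + 30)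
          then temp else temp ++ [m]) [])
        = (fun locAcc m1 =>
            locAcc.foldl (fun temp m => if pvNear m m1 then temp else temp ++ [m]) []) := by
      funext locAcc m1
      congr 1
      funext temp m
      have hiff : ((m.1 - 30 ≤ m1.1 ∧ m1.1 ≤ m.1 + 30) ∨ (m.2.1 - 30 ≤ m1.2.1 ∧ m1.2.1 ≤ m.2.1 + 30) ∨
         (m.2.2.1 - 30 ≤ m1.2.2.1 ∧ m1.2.2.1 ≤ m.2.2.1 + 30) ∨
         (m.2.2.2 - 30 ≤ m1.2.2.2 ∧ m1.2.2.2 ≤ m.2.2.2 + 30)) ↔ pvNear m m1 = true := by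
        simp only [pvNear, Bool.or_eq_true, Bool.and_eq_true, decide_eq_true_eq]
        tauto
      by_cases h : pvNear m m1 = true
      · rw [if_pos (hiff.mpr h), if_pos h]
      · rw [if_neg (fun hc => h (hiff.mp hc)), if_neg h]
    rw [hfun]
  rw [h1, pvAppendLoop]
  have h2 : loc.filter (fun m => !loc1.any (fun m1 => pvNear m m1))
      = loc.filter (fun m =>
          !(pvHit (PySem.List.sorted (loc1.map (fun m1 => m1.1)) (fun x => x) false) (m.1 - 30) (m.1 + 30) ||
            pvHit (PySem.List.sorted (loc1.map (fun m1 => m1.2.1)) (fun x => x) false) (m.2.1 - 30) (m.2.1 + 30) ||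
            pvHit (PySem.List.sorted (loc1.map (fun m1 => m1.2.2.1)) (fun x => x) false) (m.2.2.1 - 30) (m.2.2.1 + 30) ||
            pvHit (PySem.List.sorted (loc1.map (fun m1 => m1.2.2.2)) (fun x => x) false) (m.2.2.2 - 30) (m.2.2.2 + 30))) := by
    apply List.filter_congr
    intro m _
    rw [pvPredEq]
  rw [h2]
  rw [PySem.List.foldl_append_ite_eq_filter]
  apply List.filter_congr
  intro p _
  simp
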